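-- pv_equiv track=rewrite | github.com/neriaad/scholar_scraping | scholar_scraping.py | get_num_of_citations_since_n_citations
-- ===== SOURCE A (Python) =====
-- def get_num_of_citations_since_n_citations(citations: dict, n: int) -> int:
--     check = 0
--     total = 0
--     i = 0
--
--     for val in citations.values():
--         if check >= n:
--             total += val
--             i += 1
--             if i >= 10:
--                 break
--             continue
--         check += val
--
--     return total
-- ===== SOURCE B (Python) =====
-- def get_num_of_citations_since_n_citations(citations: dict, n: int) -> int:
--     vals = list(citations.values())
--     prefixes = [0]
--     for v in vals:
--         prefixes.append(prefixes[-1] + v)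
--     m = next((i for i in range(len(vals)) if prefixes[i] >= n), len(vals))
--     return sum(vals[m:m + 10])
-- ===== Notes on version B (the rewrite author's own statement) =====
-- stated objective: alternative
-- what changed: Replaces A's single stateful loop (threshold flag, counter, early break) by two separated passes: build the prefix-sum list, locate the first index m whose prefix sum reaches n, and return the sum of the fixed slice vals[m:m+10].
import Mathlib
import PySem

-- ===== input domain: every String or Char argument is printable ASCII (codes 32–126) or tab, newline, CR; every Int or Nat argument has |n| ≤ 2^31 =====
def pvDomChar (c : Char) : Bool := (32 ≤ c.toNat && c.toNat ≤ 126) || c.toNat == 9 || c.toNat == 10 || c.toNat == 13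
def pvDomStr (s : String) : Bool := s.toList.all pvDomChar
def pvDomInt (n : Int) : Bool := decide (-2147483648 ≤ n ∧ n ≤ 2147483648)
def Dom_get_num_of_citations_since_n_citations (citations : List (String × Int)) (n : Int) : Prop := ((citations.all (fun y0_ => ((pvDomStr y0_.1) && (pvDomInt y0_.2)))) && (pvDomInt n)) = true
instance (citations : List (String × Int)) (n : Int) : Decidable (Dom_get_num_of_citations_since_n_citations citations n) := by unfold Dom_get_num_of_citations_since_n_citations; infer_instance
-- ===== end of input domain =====

-- B replaces A's single stateful loop by two separated passes (prefix sums, then a fixed 10-slice after the crossing index); alternative decomposition, same cost.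

-- ===== PORT A =====
-- A's for-loop over citations.values() with state (check, total, i) and early break at i >= 10.
def aLoop (vals : List Int) (n check total i : Int) : Int :=
  match vals with
  | [] => total
  | v :: rest =>
    if check ≥ n then
      -- total += val; i += 1; if i >= 10: break
      if i + 1 ≥ 10 then total + v
      else aLoop rest n check (total + v) (i + 1)
    else aLoop rest n (check + v) total i

def get_num_of_citations_since_n_citations (citations : List (String × Int)) (n : Int) : Int :=
  aLoop (citations.map Prod.snd) n 0 0 0

-- ===== PORT B =====
-- prefixes = [0]; for v in vals: prefixes.append(prefixes[-1] + v)
def bPrefixes (vals : List Int) : List Int :=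
  vals.foldl (fun ps v => ps ++ [PySem.List.pyGetD ps (-1) 0 + v]) [0]

-- next((i for i in idxs if prefixes[i] >= n), d)
def bFind (prefixes : List Int) (n : Int) : List Int → Int → Int
  | [], d => d
  | i :: rest, d =>
    if PySem.List.pyGetD prefixes i 0 ≥ n then i else bFind prefixes n rest d

def bCore (vals : List Int) (n : Int) : Int :=
  let prefixes := bPrefixes vals
  let m := bFind prefixes n (PySem.List.pyRange 0 (vals.length : Int) 1) (vals.length : Int)
  (PySem.List.slice vals (some m) (some (m + 10))).sum

def get_num_of_citations_since_n_citations_alt (citations : List (String × Int)) (n : Int) : Int :=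
  bCore (citations.map Prod.snd) n

-- ===== PRECONDITION & SPEC =====
def Spec_get_num_of_citations_since_n_citations (citations : List (String × Int)) (n : Int) (out : Int) : Prop := out = get_num_of_citations_since_n_citations_alt citations n
instance (citations : List (String × Int)) (n : Int) (out : Int) : Decidable (Spec_get_num_of_citations_since_n_citations citations n out) := by unfold Spec_get_num_of_citations_since_n_citations; infer_instance

-- ===== CLAIM (what is proved, stated in full; the proofs are below) =====
def Claim_equal_get_num_of_citations_since_n_citations : Prop := ∀ (citations : List (String × Int)) (n : Int), Dom_get_num_of_citations_since_n_citations citations n → Spec_get_num_of_citations_since_n_citations citations n (get_num_of_citations_since_n_citations citations n)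

-- ===== LEMMAS AND PROOFS =====

-- common specification: skip values while the running sum is below n, then sum the next 10
def gSpec (vals : List Int) (n : Int) : Int :=
  match vals with
  | [] => 0
  | v :: rest => if n ≤ 0 then ((v :: rest).take 10).sum else gSpec rest (n - v)

-- A side
lemma aLoop_inner (vals : List Int) : ∀ (n check total i : Int), check ≥ n → 0 ≤ i → i < 10 →
    aLoop vals n check total i = total + (vals.take (10 - i.toNat)).sum := by
  induction vals with
  | nil => intro n check total i h h0 h10; simp [aLoop]
  | cons v rest ih =>
    intro n check total i h h0 h10
    simp only [aLoop, if_pos h]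
    by_cases hb : i + 1 ≥ 10
    · have : 10 - i.toNat = 1 := by omega
      simp [hb, this]
    · rw [if_neg hb, ih n check (total + v) (i + 1) h (by omega) (by omega)]
      have h1 : 10 - i.toNat = (10 - (i + 1).toNat) + 1 := by omega
      rw [h1]
      simp [List.take_succ_cons]
      ring

lemma aLoop_eq_g (vals : List Int) : ∀ (n check : Int), aLoop vals n check 0 0 = gSpec vals (n - check) := by
  induction vals with
  | nil => intro n check; simp [aLoop, gSpec]
  | cons v rest ih =>
    intro n check
    by_cases h : check ≥ n
    · have hle : n - check ≤ 0 := by omega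
      simp only [aLoop, if_pos h, gSpec, if_pos hle]
      rw [if_neg (by omega : ¬ ((0:Int) + 1 ≥ 10))]
      rw [aLoop_inner rest n check (0 + v) (0 + 1) h (by omega) (by omega)]
      simp [List.take_succ_cons]
    · have hle : ¬ (n - check ≤ 0) := by omega
      simp only [aLoop, if_neg h, gSpec, if_neg hle]
      rw [ih n (check + v)]
      ring_nf

-- B side: structure of bPrefixes
lemma bfold_cons (vals : List Int) : ∀ (x : Int) (ps : List Int), ps ≠ [] →
    vals.foldl (fun ps v => ps ++ [PySem.List.pyGetD ps (-1) 0 + v]) (x :: ps)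
      = x :: vals.foldl (fun ps v => ps ++ [PySem.List.pyGetD ps (-1) 0 + v]) ps := by
  induction vals with
  | nil => intro x ps h; rfl
  | cons v rest ih =>
    intro x ps h
    simp only [List.foldl_cons]
    have h1 : PySem.List.pyGetD (x :: ps) (-1) 0 = PySem.List.pyGetD ps (-1) 0 := by
      rw [PySem.List.pyGetD_neg_one (x :: ps) 0 (by simp), PySem.List.pyGetD_neg_one ps 0 h,
        List.getLast_cons h]
    rw [h1, show (x :: ps) ++ [PySem.List.pyGetD ps (-1) 0 + v] = x :: (ps ++ [PySem.List.pyGetD ps (-1) 0 + v]) from rfl]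
    exact ih x _ (by simp)

lemma bfold_map (vals : List Int) : ∀ (c : Int) (ps : List Int), ps ≠ [] →
    vals.foldl (fun ps v => ps ++ [PySem.List.pyGetD ps (-1) 0 + v]) (ps.map (c + ·))
      = (vals.foldl (fun ps v => ps ++ [PySem.List.pyGetD ps (-1) 0 + v]) ps).map (c + ·) := by
  induction vals with
  | nil => intro c ps h; rfl
  | cons v rest ih =>
    intro c ps h
    simp only [List.foldl_cons]
    have h1 : PySem.List.pyGetD (ps.map (c + ·)) (-1) 0 = c + PySem.List.pyGetD ps (-1) 0 := by
      rw [PySem.List.pyGetD_neg_one (ps.map (c + ·)) 0 (by simpa using h),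
        PySem.List.pyGetD_neg_one ps 0 h, List.getLast_map]
    rw [h1, show (ps.map (c + ·)) ++ [c + PySem.List.pyGetD ps (-1) 0 + v]
        = (ps ++ [PySem.List.pyGetD ps (-1) 0 + v]).map (c + ·) by simp [Int.add_assoc]]
    exact ih c _ (by simp)

lemma bPrefixes_cons (v : Int) (rest : List Int) :
    bPrefixes (v :: rest) = 0 :: (bPrefixes rest).map (v + ·) := by
  unfold bPrefixes
  simp only [List.foldl_cons]
  have h0 : PySem.List.pyGetD ([0] : List Int) (-1) 0 + v = v := by
    rw [PySem.List.pyGetD_neg_one ([0] : List Int) 0 (by simp)]; simp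
  rw [show ([0] : List Int) ++ [PySem.List.pyGetD ([0] : List Int) (-1) 0 + v] = 0 :: [PySem.List.pyGetD ([0] : List Int) (-1) 0 + v] from rfl, h0]
  rw [bfold_cons rest 0 [v] (by simp)]
  rw [show ([v] : List Int) = ([0] : List Int).map (v + ·) by simp]
  rw [bfold_map rest v [0] (by simp)]

lemma bPrefixes_length (vals : List Int) : (bPrefixes vals).length = vals.length + 1 := by
  induction vals with
  | nil => rfl
  | cons v rest ih => rw [bPrefixes_cons]; simp [ih]

lemma pyGetD_cons_succ_int (x : Int) (l : List Int) (i : Int) (h : 0 ≤ i) :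
    PySem.List.pyGetD (x :: l) (i + 1) 0 = PySem.List.pyGetD l i 0 := by
  obtain ⟨k, rfl⟩ := Int.eq_ofNat_of_zero_le h
  have : ((k : Int) + 1) = ((k + 1 : Nat) : Int) := by push_cast; ring
  rw [this, PySem.List.pyGetD_natCast, PySem.List.pyGetD_natCast]
  rfl

lemma bFind_shift (P : List Int) (v n : Int) : ∀ (idxs : List Int) (d : Int),
    (∀ i ∈ idxs, 0 ≤ i ∧ i < (P.length : Int)) →
    bFind (0 :: P.map (v + ·)) n (idxs.map (· + 1)) (d + 1) = bFind P (n - v) idxs d + 1 := by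
  intro idxs
  induction idxs with
  | nil => intro d _; rfl
  | cons i rest ih =>
    intro d hb
    obtain ⟨h0, hlt⟩ := hb i (by simp)
    simp only [List.map_cons, bFind]
    rw [pyGetD_cons_succ_int _ _ i h0]
    have hget : PySem.List.pyGetD (P.map (v + ·)) i 0 = v + PySem.List.pyGetD P i 0 := by
      rw [PySem.List.pyGetD_eq_getElem (P.map (v + ·)) 0 h0 (by simpa using hlt),
        PySem.List.pyGetD_eq_getElem P 0 h0 hlt]
      simp
    rw [hget]
    by_cases hc : PySem.List.pyGetD P i 0 ≥ n - v
    · rw [if_pos (by omega), if_pos hc]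
    · rw [if_neg (by omega), if_neg hc]
      exact ih d (fun j hj => hb j (by simp [hj]))

lemma bFind_nonneg (P : List Int) (n : Int) : ∀ (idxs : List Int) (d : Int),
    (∀ i ∈ idxs, 0 ≤ i) → 0 ≤ d → 0 ≤ bFind P n idxs d := by
  intro idxs
  induction idxs with
  | nil => intro d _ hd; exact hd
  | cons i rest ih =>
    intro d hb hd
    simp only [bFind]
    split_ifs
    · exact hb i (by simp)
    · exact ih d (fun j hj => hb j (by simp [hj])) hd

lemma pyRange_succ (k : Nat) :
    PySem.List.pyRange 0 ((k : Int) + 1) 1 = 0 :: (PySem.List.pyRange 0 (k : Int) 1).map (· + 1) := by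
  rw [PySem.List.pyRange_one_cons (by omega)]
  congr 1
  rw [PySem.List.pyRange_one, PySem.List.pyRange_one]
  rw [show ((k:Int) + 1 - (0 + 1)) = ((k:Int) - 0) from by ring]
  simp only [Int.sub_zero, Int.toNat_natCast, List.map_map]
  apply List.map_congr_left
  intro a _
  simp
  ring

lemma bCore_eq_g (vals : List Int) : ∀ (n : Int), bCore vals n = gSpec vals n := by
  induction vals with
  | nil => intro n; rfl
  | cons v rest ih =>
    intro n
    unfold bCore
    simp only []
    rw [bPrefixes_cons]
    have hlen : ((v :: rest).length : Int) = (rest.length : Int) + 1 := by simp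
    rw [hlen, pyRange_succ rest.length]
    simp only [bFind]
    rw [PySem.List.pyGetD_zero_cons]
    by_cases hn : (0 : Int) ≥ n
    · rw [if_pos hn]
      simp only [gSpec, if_pos (by omega : n ≤ 0)]
      rw [PySem.List.slice_zero_start,
        show ((0:Int) + 10) = ((10 : Nat) : Int) from by norm_num,
        PySem.List.slice_to_natCast]
    · rw [if_neg hn]
      have hbnd : ∀ i ∈ PySem.List.pyRange 0 (rest.length : Int) 1,
          0 ≤ i ∧ i < ((bPrefixes rest).length : Int) := by
        intro i hi
        rw [PySem.List.mem_pyRange_one] at hi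
        rw [bPrefixes_length]
        constructor
        · exact hi.1
        · push_cast; omega
      rw [bFind_shift (bPrefixes rest) v n _ (rest.length : Int) hbnd]
      set m := bFind (bPrefixes rest) (n - v) (PySem.List.pyRange 0 (rest.length : Int) 1) (rest.length : Int) with hm
      have hm0 : 0 ≤ m := by
        apply bFind_nonneg
        · intro i hi; exact ((PySem.List.mem_pyRange_one).1 hi).1
        · exact Int.natCast_nonneg _
      obtain ⟨k, hk⟩ := Int.eq_ofNat_of_zero_le hm0
      have h1 : m + 1 = ((k + 1 : Nat) : Int) := by rw [hk]; push_cast; ring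
      rw [h1, show ((k + 1 : Nat) : Int) + 10 = ((k + 1 : Nat) : Int) + ((10 : Nat) : Int) from by norm_num,
        PySem.List.slice_natCast_add]
      simp only [List.drop_succ_cons]
      have hg : gSpec (v :: rest) n = gSpec rest (n - v) := by
        simp [gSpec, if_neg (by omega : ¬ n ≤ 0)]
      rw [hg, ← ih (n - v)]
      unfold bCore
      simp only [← hm, hk]
      rw [show ((k : Int) + 10) = ((k : Int) + ((10:Nat) : Int)) from by norm_num,
        PySem.List.slice_natCast_add]

-- ===== VERDICT (by name: the statement is the Claim_ definition above) =====
theorem get_num_of_citations_since_n_citations_spec : Claim_equal_get_num_of_citations_since_n_citations := by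
  intro citations n _
  unfold Spec_get_num_of_citations_since_n_citations
  unfold get_num_of_citations_since_n_citations get_num_of_citations_since_n_citations_alt
  rw [aLoop_eq_g, bCore_eq_g]
  norm_num
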